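-- pv_equiv track=rewrite | github.com/Rachel-3/2024-Algorithm-Study | chaerim/Programmers/Level_2/Lv2_기능개발.py | solution
-- ===== SOURCE A (Python) =====
-- def solution(progresses, speeds):
--     answer = []
--     deadline = []
--
--     for progress, speed in zip(progresses, speeds):
--         remaining_progress = 100 - progress
--         day = remaining_progress // speed
--         if remaining_progress%speed != 0:
--             day += 1
--         deadline.append(day)
--
--     count = 1
--     prev_day = deadline[0]
--     for day in deadline[1:]:
--         if day <= prev_day:
--             count += 1
--         else:
--             answer.append(count)
--             count = 1
--             prev_day = day
--     answer.append(count)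
--
--     return answer
-- ===== SOURCE B (Python) =====
-- def solution(progresses, speeds):
--     deadlines = []
--     for p, s in zip(progresses, speeds):
--         rem = 100 - p
--         deadlines.append(rem // s + (1 if rem % s != 0 else 0))
--     peaks = []
--     for d in deadlines:
--         peaks.append(d if not peaks or d > peaks[-1] else peaks[-1])
--     counts = {}
--     for v in peaks:
--         counts[v] = counts.get(v, 0) + 1
--     return list(counts.values())
-- ===== Notes on version B (the rewrite author's own statement) =====
-- stated objective: alternative
-- what changed: Instead of A's single grouping loop with a running counter, B computes the prefix-maximum sequence of the deadlines and returns the multiplicity of each distinct value of that sequence via a counting dict (batch sizes = run lengths of the monotone prefix-max list, which equal value multiplicities).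
-- crash fix: On an empty zip (progresses or speeds empty) A raises IndexError at deadline[0]; B returns []. — e.g. on solution([], []): A raises IndexError, B returns []
import Mathlib
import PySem

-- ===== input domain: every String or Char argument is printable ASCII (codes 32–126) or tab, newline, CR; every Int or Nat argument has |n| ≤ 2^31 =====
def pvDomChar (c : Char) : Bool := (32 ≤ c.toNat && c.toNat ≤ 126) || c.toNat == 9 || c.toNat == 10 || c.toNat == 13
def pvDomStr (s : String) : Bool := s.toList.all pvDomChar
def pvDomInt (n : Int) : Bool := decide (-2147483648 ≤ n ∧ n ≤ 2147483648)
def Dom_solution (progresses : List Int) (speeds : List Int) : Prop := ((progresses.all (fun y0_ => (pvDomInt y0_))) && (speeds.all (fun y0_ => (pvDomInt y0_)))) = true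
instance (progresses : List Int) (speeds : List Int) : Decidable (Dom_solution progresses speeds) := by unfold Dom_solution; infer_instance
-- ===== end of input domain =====

-- B replaces A's running-counter grouping loop by a prefix-maximum pass plus a dict counting value multiplicities (objective: alternative; same cost).
-- A raises IndexError on an empty zip and ZeroDivisionError on a zero zipped speed; Pre_ excludes exactly those.


-- ===== PORT A =====
-- second loop of A: state (answer, count, prev_day) over deadline[1:]
def loopA : List Int → List Int → Int → Int → List Int
  | [], ans, count, _ => ans ++ [count]
  | day :: t, ans, count, prev =>
    if day ≤ prev then loopA t ans (count + 1) prev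
    else loopA t (ans ++ [count]) 1 day

def solution (progresses : List Int) (speeds : List Int) : List Int :=
  let deadline := (List.zip progresses speeds).foldl
    (fun acc pr =>
      let rem := 100 - pr.1
      let day := PySem.Int.floordiv rem pr.2
      let day := if PySem.Int.mod rem pr.2 ≠ 0 then day + 1 else day
      acc ++ [day]) []
  match deadline with
  | [] => []          -- Python: deadline[0] raises IndexError here; excluded by Pre_solution
  | d0 :: rest => loopA rest [] 1 d0

-- ===== PORT B =====
def solution_alt (progresses : List Int) (speeds : List Int) : List Int :=
  let deadlines := (List.zip progresses speeds).foldl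
    (fun acc pr =>
      let rem := 100 - pr.1
      acc ++ [PySem.Int.floordiv rem pr.2 + (if PySem.Int.mod rem pr.2 ≠ 0 then 1 else 0)]) []
  -- for d in deadlines: peaks.append(d if not peaks or d > peaks[-1] else peaks[-1])
  let peaks := deadlines.foldl
    (fun acc d => acc ++ [if acc = [] ∨ d > PySem.List.pyGetD acc (-1) 0 then d else PySem.List.pyGetD acc (-1) 0]) []
  -- for v in peaks: counts[v] = counts.get(v, 0) + 1
  let counts := peaks.foldl (fun d v => d.insert v (d.getD v 0 + 1)) PySem.Dict.empty
  counts.values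

-- ===== PRECONDITION & SPEC =====
-- Pre_ excludes exactly the inputs where Python A raises: an empty zip (IndexError on deadline[0])
-- and a zero speed among the zipped pairs (ZeroDivisionError).
def Pre_solution (progresses : List Int) (speeds : List Int) : Prop :=
  progresses ≠ [] ∧ speeds ≠ [] ∧ ∀ pr ∈ List.zip progresses speeds, pr.2 ≠ 0
instance (progresses : List Int) (speeds : List Int) : Decidable (Pre_solution progresses speeds) := by unfold Pre_solution; infer_instance
def pvWitness_solution : List Int × List Int := ([93, 30, 55], [1, 30, 5])

-- On an empty zip A raises IndexError at deadline[0]; B returns [].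
def Raises_solution (progresses : List Int) (speeds : List Int) : Prop :=
  progresses = [] ∨ speeds = []
instance (progresses : List Int) (speeds : List Int) : Decidable (Raises_solution progresses speeds) := by unfold Raises_solution; infer_instance
def pvRaiseWitness_solution : List Int × List Int := ([], [])
def pvRaiseWitnessOut_solution : List Int := []

def Spec_solution (progresses : List Int) (speeds : List Int) (out : List Int) : Prop := out = solution_alt progresses speeds
instance (progresses : List Int) (speeds : List Int) (out : List Int) : Decidable (Spec_solution progresses speeds out) := by unfold Spec_solution; infer_instance

-- ===== CLAIM (what is proved, stated in full; the proofs are below) =====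
def Claim_equal_solution : Prop := ∀ (progresses : List Int) (speeds : List Int), Dom_solution progresses speeds → Pre_solution progresses speeds → Spec_solution progresses speeds (solution progresses speeds)
def Claim_raises_solution : Prop := (∀ (progresses : List Int) (speeds : List Int), Dom_solution progresses speeds → Raises_solution progresses speeds → ¬ Pre_solution progresses speeds) ∧ (Dom_solution (pvRaiseWitness_solution.1) (pvRaiseWitness_solution.2) ∧ Raises_solution (pvRaiseWitness_solution.1) (pvRaiseWitness_solution.2) ∧ solution_alt (pvRaiseWitness_solution.1) (pvRaiseWitness_solution.2) = pvRaiseWitnessOut_solution)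

-- ===== LEMMAS AND PROOFS =====

-- proof-side view of the prefix maxima of t continuing from running maximum p
def pmax : Int → List Int → List Int
  | _, [] => []
  | p, d :: t => let m := if d > p then d else p; m :: pmax m t

-- proof-side view of run-length counting with an open run of prev of length c
def go : List Int → Int → Int → List Int
  | [], _, c => [c]
  | y :: ys, p, c => if y ≤ p then go ys p (c + 1) else c :: go ys y 1

lemma loopA_ans : ∀ (t ans : List Int) (c p : Int),
    loopA t ans c p = ans ++ loopA t [] c p := by
  intro t
  induction t with
  | nil =>
    intro ans c p
    rw [show loopA [] ans c p = ans ++ [c] from rfl,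
        show loopA [] [] c p = [] ++ [c] from rfl]
    simp
  | cons d t ih =>
    intro ans c p
    by_cases h : d ≤ p
    · rw [show loopA (d :: t) ans c p = loopA t ans (c + 1) p from by rw [loopA, if_pos h],
          show loopA (d :: t) [] c p = loopA t [] (c + 1) p from by rw [loopA, if_pos h]]
      exact ih ans (c + 1) p
    · rw [show loopA (d :: t) ans c p = loopA t (ans ++ [c]) 1 d from by rw [loopA, if_neg h],
          show loopA (d :: t) [] c p = loopA t ([] ++ [c]) 1 d from by rw [loopA, if_neg h]]
      rw [ih (ans ++ [c]), ih ([] ++ [c])]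
      simp

lemma loopA_eq_go : ∀ (t : List Int) (c p : Int),
    loopA t [] c p = go (pmax p t) p c := by
  intro t
  induction t with
  | nil => intro c p; rfl
  | cons d t ih =>
    intro c p
    have hpm : pmax p (d :: t)
        = (if d > p then d else p) :: pmax (if d > p then d else p) t := rfl
    by_cases h : d ≤ p
    · have hm : ¬ d > p := not_lt.mpr h
      rw [hpm, if_neg hm]
      rw [show loopA (d :: t) [] c p = loopA t [] (c + 1) p from by rw [loopA, if_pos h],
          show go (p :: pmax p t) p c = go (pmax p t) p (c + 1) from by
            rw [go, if_pos (le_refl p)]]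
      exact ih (c + 1) p
    · have hm : d > p := lt_of_not_ge h
      rw [hpm, if_pos hm]
      rw [show loopA (d :: t) [] c p = loopA t ([] ++ [c]) 1 d from by rw [loopA, if_neg h],
          show go (d :: pmax d t) p c = c :: go (pmax d t) d 1 from by rw [go, if_neg h]]
      rw [loopA_ans, ih 1 d]
      simp

lemma pmax_lb : ∀ (t : List Int) (p : Int), ∀ z ∈ pmax p t, p ≤ z := by
  intro t
  induction t with
  | nil => intro p z hz; simp [pmax] at hz
  | cons d t ih =>
    intro p z hz
    simp only [pmax, List.mem_cons] at hz
    have hpm : p ≤ if d > p then d else p := by split_ifs with h <;> omega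
    rcases hz with h | h
    · omega
    · exact le_trans hpm (ih _ z h)

lemma pmax_pairwise : ∀ (t : List Int) (p : Int), (pmax p t).Pairwise (· ≤ ·) := by
  intro t
  induction t with
  | nil => intro p; simp [pmax]
  | cons d t ih =>
    intro p
    simp only [pmax]
    exact List.Pairwise.cons (pmax_lb t _) (ih _)

-- B's peaks loop extends a nonempty accumulator by the prefix maxima from its last element
lemma peaks_fold : ∀ (t acc : List Int) (m : Int), acc ≠ [] → acc.getLast? = some m →
    t.foldl (fun acc d => acc ++ [if acc = [] ∨ d > PySem.List.pyGetD acc (-1) 0 then d else PySem.List.pyGetD acc (-1) 0]) acc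
      = acc ++ pmax m t := by
  intro t
  induction t with
  | nil => intro acc m _ _; simp [pmax]
  | cons d t ih =>
    intro acc m hne hlast
    have hget : PySem.List.pyGetD acc (-1) 0 = m := by
      rw [PySem.List.pyGetD_neg_one acc 0 hne]
      rwa [List.getLast?_eq_some_getLast hne, Option.some_inj] at hlast
    simp only [List.foldl_cons]
    have hcond : (acc = [] ∨ d > PySem.List.pyGetD acc (-1) 0) ↔ d > m := by
      simp [hne, hget]
    by_cases h : d > m
    · rw [if_pos (hcond.mpr h)]
      rw [ih (acc ++ [d]) d (by simp) (by simp)]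
      simp [pmax, h]
    · rw [if_neg (fun hc => h (hcond.mp hc)), hget]
      rw [ih (acc ++ [m]) m (by simp) (by simp)]
      simp [pmax, h]

lemma ofList_replicate (c : Nat) (p : Int) (hc : 0 < c) :
    PySem.Set.ofList (List.replicate c p) = [p] := by
  induction c with
  | zero => omega
  | succ n ihn =>
    cases Nat.eq_zero_or_pos n with
    | inl h0 => subst h0; rfl
    | inr hpos =>
      rw [List.replicate_succ', PySem.Set.ofList_append_singleton, ihn hpos]
      simp

-- key lemma: multiplicities over a monotone list starting with a run of c copies of p are its run lengths
lemma run_counts : ∀ (l : List Int) (p : Int) (c : Nat), 0 < c →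
    (∀ z ∈ l, p ≤ z) → l.Pairwise (· ≤ ·) →
    (PySem.Set.ofList (List.replicate c p ++ l)).map
        (fun k => ((List.replicate c p ++ l).count k : Int)) = go l p (c : Int) := by
  intro l
  induction l with
  | nil =>
    intro p c hc _ _
    rw [List.append_nil, ofList_replicate c p hc]
    simp [go, List.count_replicate]
  | cons y ys ih =>
    intro p c hc hlb hpw
    have hpy : p ≤ y := hlb y (List.mem_cons_self)
    by_cases h : y ≤ p
    · have hyp : y = p := le_antisymm h hpy
      have hshift : List.replicate c p ++ y :: ys = List.replicate (c + 1) p ++ ys := by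
        rw [List.replicate_succ' , hyp]; simp
      rw [hshift]
      rw [ih p (c + 1) (by omega)
        (fun z hz => hlb z (List.mem_cons_of_mem _ hz)) hpw.of_cons]
      simp [go, hyp]
    · have hlt : p < y := lt_of_not_ge h
      have hyslb : ∀ z ∈ ys, y ≤ z := fun z hz => List.rel_of_pairwise_cons hpw hz
      have hnotmem : p ∉ y :: ys := by
        intro hm
        rcases List.mem_cons.mp hm with h1 | h1
        · omega
        · exact absurd (hyslb p h1) (by omega)
      -- Set.ofList (replicate c p ++ (y::ys)) = p :: Set.ofList (y::ys)
      have hrep : PySem.Set.ofList (List.replicate c p) = [p] :=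
        ofList_replicate c p hc
      have hset : PySem.Set.ofList (List.replicate c p ++ y :: ys)
          = p :: PySem.Set.ofList (y :: ys) := by
        rw [PySem.Set.ofList_append, hrep, PySem.Set.update_eq_append_filter]
        have : (PySem.Set.ofList (y :: ys)).filter
            (fun z => !(PySem.Set.contains [p] z)) = PySem.Set.ofList (y :: ys) := by
          apply List.filter_eq_self.mpr
          intro z hz
          have hzmem : z ∈ y :: ys := (PySem.Set.mem_ofList _ _).mp hz
          have : z ≠ p := fun he => hnotmem (he ▸ hzmem)
          simp [PySem.Set.contains, this]
        rw [this]
        rfl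
      rw [hset]
      simp only [List.map_cons]
      have hcp : ((List.replicate c p ++ y :: ys).count p : Int) = (c : Int) := by
        rw [List.count_append, List.count_replicate]
        simp [List.count_eq_zero.mpr hnotmem]
      have hcongr : (PySem.Set.ofList (y :: ys)).map
            (fun k => ((List.replicate c p ++ y :: ys).count k : Int))
          = (PySem.Set.ofList (y :: ys)).map
            (fun k => ((y :: ys).count k : Int)) := by
        apply List.map_congr_left
        intro k hk
        have hkmem : k ∈ y :: ys := (PySem.Set.mem_ofList _ _).mp hk
        have hknep : k ≠ p := fun he => hnotmem (he ▸ hkmem)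
        rw [List.count_append, List.count_replicate]
        simp [Ne.symm hknep]
      rw [hcp, hcongr]
      have hys : (y :: ys) = List.replicate 1 y ++ ys := by simp
      rw [hys, ih y 1 (by omega) hyslb hpw.of_cons]
      simp [go, h]

-- the two deadline expressions agree pointwise
lemma day_eq (pr : Int × Int) :
    (let rem := 100 - pr.1
     let day := PySem.Int.floordiv rem pr.2
     if PySem.Int.mod rem pr.2 ≠ 0 then day + 1 else day)
    = PySem.Int.floordiv (100 - pr.1) pr.2 + (if PySem.Int.mod (100 - pr.1) pr.2 ≠ 0 then 1 else 0) := by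
  simp only []
  split_ifs <;> omega

lemma fold_append_map (f : Int × Int → Int) :
    ∀ (l : List (Int × Int)) (acc : List Int),
      l.foldl (fun acc pr => acc ++ [f pr]) acc = acc ++ l.map f := by
  intro l
  induction l with
  | nil => simp
  | cons x t ih => intro acc; simp [List.foldl, ih]

lemma solution_eq_alt (progresses speeds : List Int)
    (hp : progresses ≠ []) (hs : speeds ≠ []) :
    solution progresses speeds = solution_alt progresses speeds := by
  unfold solution solution_alt
  rw [fold_append_map, fold_append_map]
  simp only [List.nil_append]
  rw [show (List.zip progresses speeds).map
        (fun pr =>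
          let rem := 100 - pr.1
          let day := PySem.Int.floordiv rem pr.2
          if PySem.Int.mod rem pr.2 ≠ 0 then day + 1 else day)
      = (List.zip progresses speeds).map
        (fun pr => PySem.Int.floordiv (100 - pr.1) pr.2 +
          (if PySem.Int.mod (100 - pr.1) pr.2 ≠ 0 then 1 else 0)) from
    List.map_congr_left (fun pr _ => day_eq pr)]
  set dls := (List.zip progresses speeds).map
    (fun pr => PySem.Int.floordiv (100 - pr.1) pr.2 +
      (if PySem.Int.mod (100 - pr.1) pr.2 ≠ 0 then 1 else 0)) with hdls
  have hne : dls ≠ [] := by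
    simp [hdls, List.zip_eq_nil_iff, hp, hs]
  obtain ⟨d0, rest, hd⟩ := List.exists_cons_of_ne_nil hne
  rw [hd]
  -- A side
  rw [show (match d0 :: rest with
      | [] => ([] : List Int)
      | d0 :: rest => loopA rest [] 1 d0) = loopA rest [] 1 d0 from rfl]
  rw [loopA_eq_go]
  -- B side: peaks = d0 :: pmax d0 rest
  rw [show (d0 :: rest).foldl
        (fun acc d => acc ++ [if acc = [] ∨ d > PySem.List.pyGetD acc (-1) 0 then d else PySem.List.pyGetD acc (-1) 0]) []
      = d0 :: pmax d0 rest from by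
    have h0 : ([] : List Int) ++ [if ([] : List Int) = [] ∨ d0 > PySem.List.pyGetD ([] : List Int) (-1) 0 then d0 else PySem.List.pyGetD ([] : List Int) (-1) 0] = [d0] := by simp
    rw [List.foldl_cons, h0, peaks_fold rest [d0] d0 (by simp) (by simp)]
    simp]
  -- the counting fold is Counter
  rw [PySem.Dict.foldl_insert_getD_add_one_eq_counter]
  have hvals : (PySem.Dict.counter (d0 :: pmax d0 rest)).values
      = (PySem.Set.ofList (d0 :: pmax d0 rest)).map
          (fun k => (((d0 :: pmax d0 rest).count k : Int))) := by
    show ((PySem.Dict.counter (d0 :: pmax d0 rest)).items.map (·.2)) = _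
    rw [PySem.Dict.items_counter]
    simp
  rw [hvals]
  rw [show (d0 :: pmax d0 rest) = List.replicate 1 d0 ++ pmax d0 rest from by simp]
  rw [run_counts (pmax d0 rest) d0 1 (by omega) (pmax_lb rest d0) (pmax_pairwise rest d0)]
  rfl

-- ===== VERDICT (by name: the statement is the Claim_ definition above) =====
theorem solution_spec : Claim_equal_solution := by
  intro progresses speeds _ hpre
  exact solution_eq_alt progresses speeds hpre.1 hpre.2.1

theorem solution_raises : Claim_raises_solution := by
  unfold Claim_raises_solution
  refine ⟨?_, by decide⟩
  rintro progresses speeds _ (h | h) ⟨h1, h2, _⟩ <;> [exact h1 h; exact h2 h]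

-- the crash-fix witness spelled out: ([], []) is in Dom and Raises_, and B returns [] there
theorem solution_raises_witness :
    Dom_solution ([] : List Int) ([] : List Int) ∧ Raises_solution ([] : List Int) ([] : List Int) ∧
      solution_alt ([] : List Int) ([] : List Int) = pvRaiseWitnessOut_solution :=
  solution_raises.2
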